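-- pv_equiv track=rewrite | github.com/daniel-reich/ubiquitous-fiesta | djJpmZPPBx3JaAqcK_0.py | maya_number
-- ===== SOURCE A (Python) =====
-- def maya_number(n):
--     if n == 0:
--         return ['@']
--
--     res = []
--     while n:
--         if n%20:
--             lines, dots = divmod(n%20, 5)
--             res.append('{}{}'.format('o'*dots, '-'*lines))
--         else:
--             res.append('@')
--         n //= 20
--
--     return res[::-1]
-- ===== SOURCE B (Python) =====
-- _DIGITS = ['@'] + ['o' * (d % 5) + '-' * (d // 5) for d in range(1, 20)]
--
-- def maya_number(n):
--     if n == 0: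
--         return ['@']
--     p = 1
--     while p * 20 <= n:
--         p *= 20
--     out = []
--     while p > 0:
--         out.append(_DIGITS[(n // p) % 20])
--         p //= 20
--     return out
-- ===== Notes on version B (the rewrite author's own statement) =====
-- stated objective: alternative
-- what changed: Replaces A's least-significant-first while-loop with a final list reversal by a most-significant-first extraction: B precomputes the 20 digit glyphs in a table once, finds the largest power of 20 not exceeding n, and walks the powers downward indexing the table with (n // p) % 20, so no per-digit string building and no reversal.
-- outside the precondition, e.g. on maya_number(-1): A does not finish within the time limit, B returns ['oooo---']
import Mathlib
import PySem

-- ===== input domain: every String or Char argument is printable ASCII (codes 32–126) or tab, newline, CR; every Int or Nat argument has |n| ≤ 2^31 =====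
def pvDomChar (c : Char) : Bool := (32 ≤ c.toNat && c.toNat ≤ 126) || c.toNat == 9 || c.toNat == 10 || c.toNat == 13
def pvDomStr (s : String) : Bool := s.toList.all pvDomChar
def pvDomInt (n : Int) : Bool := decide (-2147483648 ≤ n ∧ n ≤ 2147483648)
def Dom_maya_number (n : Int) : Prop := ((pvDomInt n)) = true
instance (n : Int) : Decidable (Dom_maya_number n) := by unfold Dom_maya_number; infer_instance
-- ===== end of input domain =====

-- B extracts base-20 digits most-significant-first (largest power of 20 down), reading each
-- glyph from a precomputed 20-entry table, instead of A's LSB-first loop plus reversal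
-- ('alternative' decomposition, same cost). Loops are ported with a fuel argument that is a
-- totality device only: the fuel passed at each call site is proved sufficient below.

-- ===== PORT A =====
-- A's per-digit rendering: '@' for 0, else 'o'*dots + '-'*lines with lines, dots = divmod(r, 5).
def digitA (r : Int) : String :=
  if r ≠ 0 then
    String.ofList (List.replicate (PySem.Int.mod r 5).toNat 'o' ++
                   List.replicate (PySem.Int.floordiv r 5).toNat '-')
  else "@"

-- A's while loop: accumulator res, least-significant digit appended each round; 'n //= 20'.
-- The 'n ≤ 0' guard mirrors 'while n' (n stays positive; Python diverges for n < 0, excluded by Pre_).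
def mayaLoopA : Nat → Int → List String → List String
  | 0, _, res => res
  | fuel + 1, n, res =>
    if n ≤ 0 then res
    else mayaLoopA fuel (PySem.Int.floordiv n 20) (res ++ [digitA (PySem.Int.mod n 20)])

def maya_number (n : Int) : List String :=
  if n == 0 then ["@"]
  else (mayaLoopA n.toNat n []).reverse   -- res[::-1]

-- ===== PORT B =====
-- the table _DIGITS = ['@'] + ['o'*(d%5) + '-'*(d//5) for d in range(1, 20)]
def mayaDigits : List String :=
  "@" :: (PySem.List.pyRange 1 20 1).map (fun d =>
    String.ofList (List.replicate (PySem.Int.mod d 5).toNat 'o' ++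
                   List.replicate (PySem.Int.floordiv d 5).toNat '-'))

-- 'while p * 20 <= n: p *= 20'; the '1 ≤ p' conjunct is a totality guard only (p starts at 1).
def mayaPowB : Nat → Int → Int → Int
  | 0, _, p => p
  | fuel + 1, n, p =>
    if 1 ≤ p ∧ p * 20 ≤ n then mayaPowB fuel n (p * 20) else p

-- 'while p > 0: out.append(_DIGITS[(n // p) % 20]); p //= 20'; getD "@" is the in-range lookup.
def mayaDigLoopB : Nat → Int → Int → List String
  | 0, _, _ => []
  | fuel + 1, n, p =>
    if p ≤ 0 then []
    else (PySem.List.pyGet? mayaDigits (PySem.Int.mod (PySem.Int.floordiv n p) 20)).getD "@"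
         :: mayaDigLoopB fuel n (PySem.Int.floordiv p 20)

def maya_number_alt (n : Int) : List String :=
  if n == 0 then ["@"]
  else
    let p := mayaPowB n.toNat n 1
    mayaDigLoopB p.toNat n p

-- ===== PRECONDITION & SPEC =====
-- Pre_ excludes negative n, on which Python A never terminates ('while n' with n //= 20 stuck at -1).
def Pre_maya_number (n : Int) : Prop := 0 ≤ n
instance (n : Int) : Decidable (Pre_maya_number n) := by unfold Pre_maya_number; infer_instance
def pvWitness_maya_number : Int := (12345)

def Spec_maya_number (n : Int) (out : List String) : Prop := out = maya_number_alt n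
instance (n : Int) (out : List String) : Decidable (Spec_maya_number n out) := by unfold Spec_maya_number; infer_instance

-- ===== CLAIM (what is proved, stated in full; the proofs are below) =====
def Claim_equal_maya_number : Prop := ∀ (n : Int), Dom_maya_number n → Pre_maya_number n → Spec_maya_number n (maya_number n)

-- ===== LEMMAS AND PROOFS =====

-- Reference list of digits, most-significant first (plain Int division; proof-side only).
def mayaMSB (m : Int) : List String :=
  if _h : m ≤ 0 then []
  else mayaMSB (m / 20) ++ [digitA (m % 20)]
termination_by m.toNat
decreasing_by omega

-- With sufficient fuel, A's loop appends exactly the MSB digits in reverse order.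
theorem mayaLoop_eq_MSB_rev (fuel : Nat) : ∀ (m : Int), m.toNat ≤ fuel →
    ∀ res, mayaLoopA fuel m res = res ++ (mayaMSB m).reverse := by
  induction fuel with
  | zero =>
    intro m hm res
    have h0 : m ≤ 0 := by omega
    rw [mayaLoopA, mayaMSB]; simp [h0]
  | succ fuel ih =>
    intro m hm res
    by_cases h0 : m ≤ 0
    · rw [mayaLoopA, mayaMSB]; simp [h0]
    · have h1 : PySem.Int.floordiv m 20 = m / 20 := PySem.Int.floordiv_eq_ediv_of_pos (by omega)
      have h2 : PySem.Int.mod m 20 = m % 20 := PySem.Int.mod_eq_emod_of_pos (by omega)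
      rw [mayaLoopA, mayaMSB]
      simp only [h0, if_false, dite_false]
      rw [h1, h2, ih (m / 20) (by omega)]
      simp [List.append_assoc]

-- Proof-side well-founded versions of B's two loops (no fuel).
def mayaPowW (n p : Int) : Int :=
  if _h : 1 ≤ p ∧ p * 20 ≤ n then mayaPowW n (p * 20) else p
termination_by (n - p).toNat
decreasing_by omega

def mayaDigLoopW (n p : Int) : List String :=
  if _h : p ≤ 0 then []
  else (PySem.List.pyGet? mayaDigits (PySem.Int.mod (PySem.Int.floordiv n p) 20)).getD "@"
       :: mayaDigLoopW n (PySem.Int.floordiv p 20)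
termination_by p.toNat
decreasing_by
  have h1 : PySem.Int.floordiv p 20 = p / 20 := PySem.Int.floordiv_eq_ediv_of_pos (by omega)
  omega

-- The fuel passed by the ports is sufficient: fuel versions agree with the WF versions.
theorem powB_fuel (fuel : Nat) : ∀ (n p : Int), (n - p).toNat ≤ fuel →
    mayaPowB fuel n p = mayaPowW n p := by
  induction fuel with
  | zero =>
    intro n p h
    have : ¬ (1 ≤ p ∧ p * 20 ≤ n) := by omega
    rw [mayaPowB, mayaPowW]; simp [this]
  | succ fuel ih =>
    intro n p h
    rw [mayaPowB, mayaPowW]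
    by_cases hc : 1 ≤ p ∧ p * 20 ≤ n
    · simp only [hc]
      exact ih n (p * 20) (by omega)
    · simp [hc]

theorem digLoopB_fuel (fuel : Nat) : ∀ (n p : Int), p.toNat ≤ fuel →
    mayaDigLoopB fuel n p = mayaDigLoopW n p := by
  induction fuel with
  | zero =>
    intro n p h
    have h0 : p ≤ 0 := by omega
    rw [mayaDigLoopB, mayaDigLoopW]; simp [h0]
  | succ fuel ih =>
    intro n p h
    by_cases h0 : p ≤ 0
    · rw [mayaDigLoopB, mayaDigLoopW]; simp [h0]
    · have h1 : PySem.Int.floordiv p 20 = p / 20 := PySem.Int.floordiv_eq_ediv_of_pos (by omega)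
      rw [mayaDigLoopB, mayaDigLoopW]
      simp only [h0, if_false, dite_false]
      rw [ih n (PySem.Int.floordiv p 20) (by rw [h1]; omega)]

-- Table lookup agrees with A's renderer on every digit value.
theorem digits_table_eq (r : Int) (h0 : 0 ≤ r) (h1 : r < 20) :
    (PySem.List.pyGet? mayaDigits r).getD "@" = digitA r := by
  interval_cases r <;> decide

-- One unfolding step of B's digit loop for a positive power.
theorem digLoop_unfold (n p : Int) (hp : 0 < p) :
    mayaDigLoopW n p =
      (PySem.List.pyGet? mayaDigits ((n / p) % 20)).getD "@" :: mayaDigLoopW n (p / 20) := by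
  rw [mayaDigLoopW]
  rw [PySem.Int.floordiv_eq_ediv_of_pos hp, PySem.Int.mod_eq_emod_of_pos (by norm_num),
      PySem.Int.floordiv_eq_ediv_of_pos (by norm_num : (0:Int) < 20)]
  simp [show ¬ (p ≤ 0) from by omega]

theorem digLoop_none (n p : Int) (hp : p ≤ 0) : mayaDigLoopW n p = [] := by
  rw [mayaDigLoopW]; simp [hp]

-- Stripping the top digit: B's loop from power 20^(k+1) = loop of n/20 from 20^k plus last digit.
theorem digLoop_shift (k : Nat) : ∀ (n : Int), 0 ≤ n →
    mayaDigLoopW n ((20:Int)^(k+1)) = mayaDigLoopW (n / 20) ((20:Int)^k) ++ [digitA (n % 20)] := by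
  induction k with
  | zero =>
    intro n hn
    rw [show ((20:Int)^(0+1)) = 20 from by norm_num, show ((20:Int)^0) = 1 from by norm_num]
    rw [digLoop_unfold n 20 (by norm_num), show (20:Int)/20 = 1 from by norm_num,
        digLoop_unfold n 1 (by norm_num), digLoop_unfold (n/20) 1 (by norm_num),
        show (1:Int)/20 = 0 from by norm_num]
    rw [digLoop_none _ 0 le_rfl, digLoop_none _ 0 le_rfl]
    rw [Int.ediv_one, Int.ediv_one]
    rw [digits_table_eq (n % 20) (Int.emod_nonneg _ (by norm_num)) (Int.emod_lt_of_pos _ (by norm_num))]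
    simp
  | succ k ih =>
    intro n hn
    rw [digLoop_unfold n _ (by positivity), digLoop_unfold (n/20) _ (by positivity)]
    have hdiv : n / (20:Int)^(k+1+1) = (n/20) / (20:Int)^(k+1) := by
      rw [pow_succ' (20:Int) (k+1), Int.ediv_ediv_of_nonneg (by norm_num : (0:Int) ≤ 20)]
    have hpow1 : ((20:Int)^(k+1+1)) / 20 = (20:Int)^(k+1) := by
      rw [pow_succ]; exact Int.mul_ediv_cancel _ (by norm_num)
    have hpow2 : ((20:Int)^(k+1)) / 20 = (20:Int)^k := by
      rw [pow_succ]; exact Int.mul_ediv_cancel _ (by norm_num)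
    rw [hdiv, hpow1, hpow2, ih n hn]
    simp

-- Main: from the exact leading power, B's loop produces the MSB digit list.
theorem digLoop_eq_MSB (N : Nat) : ∀ (n : Int), n.toNat = N → ∀ (k : Nat),
    (20:Int)^k ≤ n → n < (20:Int)^(k+1) → mayaDigLoopW n ((20:Int)^k) = mayaMSB n := by
  induction N using Nat.strong_induction_on with
  | _ N ih =>
    intro n hN k hlo hhi
    have hn1 : (1:Int) ≤ n := le_trans (one_le_pow₀ (by norm_num)) hlo
    cases k with
    | zero =>
      have hn20 : n < 20 := by simpa using hhi
      rw [show ((20:Int)^0) = 1 from by norm_num, digLoop_unfold n 1 (by norm_num),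
          show (1:Int)/20 = 0 from by norm_num, digLoop_none _ 0 le_rfl, Int.ediv_one]
      rw [mayaMSB]
      simp only [show ¬ (n ≤ 0) from by omega, dite_false]
      rw [show n / 20 = 0 from by omega, show mayaMSB 0 = [] from by rw [mayaMSB]; simp]
      rw [digits_table_eq (n % 20) (Int.emod_nonneg _ (by norm_num)) (Int.emod_lt_of_pos _ (by norm_num))]
      simp
    | succ k =>
      have hn0 : (0:Int) ≤ n := by omega
      rw [digLoop_shift k n hn0]
      have hlo' : (20:Int)^k ≤ n / 20 := by
        rw [Int.le_ediv_iff_mul_le (by norm_num)]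
        calc (20:Int)^k * 20 = 20^(k+1) := by ring
        _ ≤ n := hlo
      have hhi' : n / 20 < (20:Int)^(k+1) := by
        rw [Int.ediv_lt_iff_lt_mul (by norm_num)]
        calc n < (20:Int)^(k+1+1) := hhi
        _ = 20^(k+1) * 20 := by ring
      have hlt : (n / 20).toNat < N := by
        have : n / 20 < n := by omega
        omega
      rw [ih _ hlt (n/20) rfl k hlo' hhi']
      rw [show mayaMSB n = mayaMSB (n/20) ++ [digitA (n % 20)] from by
        rw [mayaMSB]; simp [show ¬ (n ≤ 0) from by omega]]

-- The power loop returns the exact leading power of 20.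
theorem powW_spec (M : Nat) : ∀ (n p : Int), (n - p).toNat = M → 0 < p → p ≤ n →
    (∀ j : Nat, p = (20:Int)^j →
      ∃ k : Nat, mayaPowW n p = (20:Int)^k ∧ (20:Int)^k ≤ n ∧ n < (20:Int)^(k+1)) := by
  induction M using Nat.strong_induction_on with
  | _ M ih =>
    intro n p hM hp hpn j hj
    subst hj
    rw [mayaPowW]
    by_cases h : 1 ≤ (20:Int)^j ∧ (20:Int)^j * 20 ≤ n
    · simp only [h]
      refine ih ((n - (20:Int)^j*20).toNat) (by omega) n ((20:Int)^j*20) rfl (by omega) h.2 (j+1) ?_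
      ring
    · simp only [h, dite_false]
      have h1 : (1:Int) ≤ (20:Int)^j := one_le_pow₀ (by norm_num)
      have h2 : n < (20:Int)^j * 20 := by
        rcases not_and_or.mp h with h' | h' <;> omega
      exact ⟨j, rfl, hpn, by rw [pow_succ]; omega⟩

-- ===== VERDICT (by name: the statement is the Claim_ definition above) =====
theorem maya_number_spec : Claim_equal_maya_number := by
  intro n _ hpre
  unfold Spec_maya_number maya_number maya_number_alt
  by_cases h0 : n = 0
  · simp [h0]
  · have hb : (n == 0) = false := by simp [h0]
    rw [hb]
    simp only [Bool.false_eq_true, if_false]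
    have hn1 : (1:Int) ≤ n := by unfold Pre_maya_number at hpre; omega
    obtain ⟨k, hk, hlo, hhi⟩ :=
      powW_spec ((n - 1).toNat) n 1 rfl (by norm_num) hn1 0 (by norm_num)
    have hpow : mayaPowB n.toNat n 1 = mayaPowW n 1 := powB_fuel n.toNat n 1 (by omega)
    rw [hpow, digLoopB_fuel _ n (mayaPowW n 1) (by omega), hk,
        digLoop_eq_MSB n.toNat n rfl k hlo hhi,
        mayaLoop_eq_MSB_rev n.toNat n le_rfl []]
    simp
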